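-- pv_equiv track=rewrite | github.com/leesok23/Algorithms | 프로그래머스/Lv. 1/크레인 인형뽑기 게임.py | solution
-- ===== SOURCE A (Python) =====
-- def solution(board, moves):
--     basket = []
--     pos = [0] * len(board)
--     count = 0
--     for move in moves:
--         i = pos[move-1]
--         while i < len(board):
--             if board[i][move-1] == 0:
--                 i += 1
--             elif board[i][move-1] != 0:
--                 if len(basket) == 0 or basket[-1] != board[i][move-1]:
--                     basket.append(board[i][move-1])
--                 else:
--                     basket.pop()
--                     count += 1
--                 board[i][move-1] = 0
--                 pos[move-1] = i
--                 break
--     return count * 2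
-- ===== SOURCE B (Python) =====
-- def solution(board, moves):
--     n = len(board)
--     # Per-column stacks of (row, value) for the non-zero cells, top of the board first.
--     cols = [[(i, row[c]) for i, row in enumerate(board) if row[c] != 0] for c in range(n)]
--     basket = []
--     count = 0
--     for m in moves:
--         col = cols[m - 1]
--         if col:
--             (row, v), cols[m - 1] = col[0], col[1:]
--             board[row][m - 1] = 0   # same in-place mutation as the original
--             if basket and basket[-1] == v:
--                 basket.pop()
--                 count += 1
--             else:
--                 basket.append(v)
--     return count * 2
-- ===== Notes on version B (the rewrite author's own statement) =====
-- stated objective: idiomatic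
-- what changed: Replaces A's per-move downward rescan of the mutated board with per-column stacks of non-zero (row,value) cells built once up front, each move just popping the stack's top.
-- outside the precondition, e.g. on solution([[1], [2, 3]], [1]): A returns 0, B raises IndexError
import Mathlib
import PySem

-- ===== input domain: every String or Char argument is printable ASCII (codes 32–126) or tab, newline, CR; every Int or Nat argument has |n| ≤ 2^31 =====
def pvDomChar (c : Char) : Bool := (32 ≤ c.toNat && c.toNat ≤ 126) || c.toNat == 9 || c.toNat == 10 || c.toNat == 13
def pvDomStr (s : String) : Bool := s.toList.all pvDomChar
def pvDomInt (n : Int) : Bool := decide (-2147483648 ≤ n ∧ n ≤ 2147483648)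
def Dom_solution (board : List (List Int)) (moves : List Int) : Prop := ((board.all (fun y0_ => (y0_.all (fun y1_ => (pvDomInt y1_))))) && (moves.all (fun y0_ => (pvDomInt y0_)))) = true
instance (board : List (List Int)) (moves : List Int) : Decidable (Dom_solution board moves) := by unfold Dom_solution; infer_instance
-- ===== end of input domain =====

-- B builds per-column stacks of the non-zero cells once and pops them, instead of A's
-- per-move downward rescan of the mutated board.  Both Pythons mutate `board` in place
-- identically (zeroing grabbed cells); the equivalence proved here is about the return value.
-- In both ports the Python basket (append/pop/[-1] at the END) is kept REVERSED: head = top.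

-- ===== PORT A =====
-- board[i][move-1] with Python indexing (in range under Pre_)
def pvCellA (board : List (List Int)) (i c : Int) : Int :=
  PySem.List.pyGetD (PySem.List.pyGetD board i []) c 0

-- A's `while i < len(board)` scan; fuel = len(board) bounds the iterations (i starts ≥ 0 under Pre_)
def pvScanA (board : List (List Int)) (c : Int) : Nat → Int → Option Int
  | 0, _ => none
  | f+1, i =>
    if i < (board.length : Int) then
      if pvCellA board i c = 0 then pvScanA board c f (i+1)
      else some i
    else none

def pvStepA (st : List (List Int) × List Int × List Int × Int) (m : Int) :
    List (List Int) × List Int × List Int × Int :=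
  match pvScanA st.1 (m-1) st.1.length (PySem.List.pyGetD st.2.1 (m-1) 0) with
  | none => st
  | some i =>
    let v := pvCellA st.1 i (m-1)
    let bc : List Int × Int :=
      if st.2.2.1 = [] ∨ st.2.2.1.headD 0 ≠ v then (v :: st.2.2.1, st.2.2.2)
      else (st.2.2.1.tail, st.2.2.2 + 1)
    (PySem.List.pySetD st.1 i (PySem.List.pySetD (PySem.List.pyGetD st.1 i []) (m-1) 0),
     PySem.List.pySetD st.2.1 (m-1) i, bc.1, bc.2)

def solution (board : List (List Int)) (moves : List Int) : Int :=
  (moves.foldl pvStepA (board, List.replicate board.length 0, [], 0)).2.2.2 * 2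

-- ===== PORT B =====
-- cols = [[(i, row[c]) for i, row in enumerate(board) if row[c] != 0] for c in range(n)]
def pvColsB (board : List (List Int)) : List (List (Int × Int)) :=
  (List.range board.length).map (fun (c : Nat) =>
    (PySem.List.enumerate board 0).filterMap (fun p =>
      if PySem.List.pyGetD p.2 (c : Int) 0 ≠ 0 then some (p.1, PySem.List.pyGetD p.2 (c : Int) 0)
      else none))

def pvStepB (st : List (List (Int × Int)) × List Int × Int) (m : Int) :
    List (List (Int × Int)) × List Int × Int :=
  match PySem.List.pyGetD st.1 (m-1) [] with
  | [] => st
  | (_, v) :: rest =>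
    let cols' := PySem.List.pySetD st.1 (m-1) rest
    if st.2.1 ≠ [] ∧ st.2.1.headD 0 = v then (cols', st.2.1.tail, st.2.2 + 1)
    else (cols', v :: st.2.1, st.2.2)

def solution_alt (board : List (List Int)) (moves : List Int) : Int :=
  (moves.foldl pvStepB (pvColsB board, [], 0)).2.2 * 2

-- ===== PRECONDITION & SPEC =====
-- Pre_ excludes non-square boards and moves whose column index m-1 falls outside Python range
-- [-len(board), len(board)): there A raises IndexError on most of them, and on the rest
-- (short rows A never scans) B's up-front column build raises where A happens to return.
def Pre_solution (board : List (List Int)) (moves : List Int) : Prop :=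
  (∀ row ∈ board, row.length = board.length) ∧
  ∀ m ∈ moves, 0 < board.length ∧ 1 - (board.length : Int) ≤ m ∧ m ≤ (board.length : Int)
instance (board : List (List Int)) (moves : List Int) : Decidable (Pre_solution board moves) := by
  unfold Pre_solution; infer_instance
def pvWitness_solution : List (List Int) × List Int := ([[0, 3], [2, 5]], [1, 2, 2, 1])

def Spec_solution (board : List (List Int)) (moves : List Int) (out : Int) : Prop := out = solution_alt board moves
instance (board : List (List Int)) (moves : List Int) (out : Int) : Decidable (Spec_solution board moves out) := by unfold Spec_solution; infer_instance

-- ===== CLAIM (what is proved, stated in full; the proofs are below) =====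
def Claim_equal_solution : Prop := ∀ (board : List (List Int)) (moves : List Int), Dom_solution board moves → Pre_solution board moves → Spec_solution board moves (solution board moves)

-- ===== LEMMAS AND PROOFS =====

def cIdx (n : Nat) (c : Int) : Nat := (if c < 0 then c + n else c).toNat

theorem pyGetD_norm {α} (xs : List α) (c : Int) (d : α) (h1 : -(xs.length:Int) ≤ c) (h2 : c < xs.length) :
    PySem.List.pyGetD xs c d = xs.getD (cIdx xs.length c) d := by
  by_cases hc : c < 0
  · have hk : c = -(((-c).toNat : Nat) : Int) := by omega
    rw [hk, PySem.List.pyGetD_neg_natCast xs (-c).toNat d (by omega) (by omega)]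
    rw [cIdx, if_pos (by omega), List.getD_eq_getElem xs d (by omega)]
    congr 1
    omega
  · rw [PySem.List.pyGetD_eq_getElem xs d (by omega) h2, cIdx, if_neg hc,
      List.getD_eq_getElem xs d (by omega)]

theorem pySetD_norm {α} (xs : List α) (c : Int) (v : α) (h1 : -(xs.length:Int) ≤ c) (h2 : c < xs.length) :
    PySem.List.pySetD xs c v = xs.set (cIdx xs.length c) v := by
  by_cases hc : c < 0
  · unfold PySem.List.pySetD PySem.List.pySet? PySem.List.pyIdx?
    rw [if_neg (by omega), if_pos (by omega)]
    simp only [Option.map_some, Option.getD_some, cIdx, if_pos hc]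
    congr 1
    omega
  · rw [PySem.List.pySetD_of_nonneg xs v (by omega), cIdx, if_neg hc]

theorem cIdx_lt {n : Nat} {c : Int} (h1 : -(n:Int) ≤ c) (h2 : c < n) : cIdx n c < n := by
  unfold cIdx; split <;> omega

def pvCell (board : List (List Int)) (i c : Nat) : Int := (board.getD i []).getD c 0

def pvColFrom (board : List (List Int)) (c : Nat) (a : Nat) : List (Int × Int) :=
  (List.range' a (board.length - a)).filterMap
    (fun i => if pvCell board i c ≠ 0 then some ((i:Int), pvCell board i c) else none)

theorem colFrom_of_le (board : List (List Int)) (c a : Nat) (h : board.length ≤ a) :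
    pvColFrom board c a = [] := by
  unfold pvColFrom
  rw [Nat.sub_eq_zero_of_le h]
  rfl

theorem colFrom_succ (board : List (List Int)) (c a : Nat) (h : a < board.length) :
    pvColFrom board c a =
      (if pvCell board a c ≠ 0 then [((a:Int), pvCell board a c)] else []) ++ pvColFrom board c (a+1) := by
  unfold pvColFrom
  have : board.length - a = (board.length - (a+1)) + 1 := by omega
  rw [this, List.range'_succ, List.filterMap_cons]
  split <;> simp_all

theorem colFrom_eq_of_zero (board : List (List Int)) (c : Nat) :
    ∀ (k a b : Nat), b - a ≤ k → a ≤ b → b ≤ board.length →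
    (∀ i, a ≤ i → i < b → pvCell board i c = 0) →
    pvColFrom board c a = pvColFrom board c b := by
  intro k
  induction k with
  | zero => intro a b h1 h2 _ _; have : a = b := by omega
            rw [this]
  | succ k ih =>
    intro a b h1 h2 h3 h4
    by_cases hab : a = b
    · rw [hab]
    · rw [colFrom_succ board c a (by omega), if_neg (by simp [h4 a le_rfl (by omega)])]
      simp only [List.nil_append]
      exact ih (a+1) b (by omega) (by omega) h3 (fun i hi hi2 => h4 i (by omega) hi2)

theorem colFrom_congr (b1 b2 : List (List Int)) (c a : Nat) (hlen : b1.length = b2.length)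
    (h : ∀ i, a ≤ i → i < b1.length → pvCell b1 i c = pvCell b2 i c) :
    pvColFrom b1 c a = pvColFrom b2 c a := by
  unfold pvColFrom
  rw [← hlen]
  exact List.filterMap_congr (fun i hi => by
    rw [List.mem_range'_1] at hi
    rw [h i hi.1 (by omega)])


theorem getD_set_self {α} (xs : List α) (k : Nat) (v d : α) (h : k < xs.length) :
    (xs.set k v).getD k d = v := by
  rw [List.getD_eq_getElem?_getD, List.getElem?_set_self h, Option.getD_some]

theorem getD_set_ne {α} (xs : List α) (k : Nat) (v : α) (i : Nat) (d : α) (h : k ≠ i) :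
    (xs.set k v).getD i d = xs.getD i d := by
  rw [List.getD_eq_getElem?_getD, List.getElem?_set_ne h, ← List.getD_eq_getElem?_getD]

theorem getD_of_le {α} (xs : List α) (i : Nat) (d : α) (h : xs.length ≤ i) :
    xs.getD i d = d := by
  rw [List.getD_eq_getElem?_getD, List.getElem?_eq_none h, Option.getD_none]

theorem cell_update_self (board : List (List Int)) (j cc : Nat) :
    pvCell (board.set j ((board.getD j []).set cc 0)) j cc = 0 := by
  unfold pvCell
  by_cases hj : j < board.length
  · rw [getD_set_self _ _ _ _ hj]
    by_cases hcc : cc < (board.getD j []).length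
    · rw [getD_set_self _ _ _ _ hcc]
    · rw [getD_of_le _ _ _ (by rw [List.length_set]; omega)]
  · rw [List.set_eq_of_length_le (by omega),
      getD_of_le board j [] (by omega)]
    rfl

theorem cell_update_ne (board : List (List Int)) (j cc i c' : Nat) (h : i ≠ j ∨ c' ≠ cc) :
    pvCell (board.set j ((board.getD j []).set cc 0)) i c' = pvCell board i c' := by
  unfold pvCell
  rcases h with h | h
  · rw [getD_set_ne _ _ _ _ _ (fun he => h he.symm)]
  · by_cases hij : i = j
    · subst hij
      by_cases hj : i < board.length
      · rw [getD_set_self _ _ _ _ hj, getD_set_ne _ _ _ _ _ (fun he => h he.symm)]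
      · rw [List.set_eq_of_length_le (by omega)]
    · rw [getD_set_ne _ _ _ _ _ (fun he => hij he.symm)]

theorem scan_spec (board : List (List Int)) (c : Int) (cc : Nat)
    (hcell : ∀ i : Nat, i < board.length → pvCellA board (i:Int) c = pvCell board i cc) :
    ∀ (f p : Nat), board.length ≤ f + p →
    (pvScanA board c f (p:Int) = none ∧ ∀ i, p ≤ i → i < board.length → pvCell board i cc = 0)
    ∨ ∃ j : Nat, pvScanA board c f (p:Int) = some (j:Int) ∧ p ≤ j ∧ j < board.length ∧
        pvCell board j cc ≠ 0 ∧ ∀ i, p ≤ i → i < j → pvCell board i cc = 0 := by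
  intro f
  induction f with
  | zero =>
    intro p hp
    left
    exact ⟨rfl, fun i h1 h2 => absurd h2 (by omega)⟩
  | succ f ih =>
    intro p hp
    by_cases hlt : (p:Int) < (board.length:Int)
    · have hplen : p < board.length := by exact_mod_cast hlt
      rw [pvScanA, if_pos hlt]
      by_cases hz : pvCellA board (p:Int) c = 0
      · rw [if_pos hz]
        have hz' : pvCell board p cc = 0 := by rw [← hcell p hplen]; exact hz
        have hcast : (p:Int) + 1 = ((p+1 : Nat):Int) := by push_cast; ring
        rw [hcast]
        rcases ih (p+1) (by omega) with ⟨hn, hall⟩ | ⟨j, hs, h1, h2, h3, h4⟩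
        · left
          refine ⟨hn, fun i hi1 hi2 => ?_⟩
          rcases Nat.eq_or_lt_of_le hi1 with he | hlt2
          · rw [← he]; exact hz'
          · exact hall i (by omega) hi2
        · right
          refine ⟨j, hs, by omega, h2, h3, fun i hi1 hi2 => ?_⟩
          rcases Nat.eq_or_lt_of_le hi1 with he | hlt2
          · rw [← he]; exact hz'
          · exact h4 i (by omega) hi2
      · rw [if_neg hz]
        right
        exact ⟨p, rfl, le_rfl, hplen, by rw [← hcell p hplen]; exact hz,
          fun i h1 h2 => absurd h2 (by omega)⟩
    · left
      refine ⟨?_, fun i h1 h2 => absurd h1 (by omega)⟩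
      rw [pvScanA, if_neg hlt]

theorem colsB_getD (board : List (List Int)) (cc : Nat) (h : cc < board.length) :
    (pvColsB board).getD cc [] = pvColFrom board cc 0 := by
  unfold pvColsB
  rw [PySem.List.getD_map_range _ _ _ _ h]
  rw [PySem.List.enumerate_eq_map_pyRange board ([] : List Int)]
  unfold pvColFrom pvCell
  simp [List.filterMap_map, PySem.List.pyRange_one, List.range_eq_range', PySem.List.len]

def pvInv (n : Nat) (board : List (List Int)) (pos : List Int) (cols : List (List (Int × Int))) : Prop :=
  board.length = n ∧ pos.length = n ∧ cols.length = n ∧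
  (∀ row ∈ board, row.length = n) ∧
  ∀ cc, cc < n →
    cols.getD cc [] = pvColFrom board cc 0 ∧
    ∃ p : Nat, pos.getD cc 0 = (p:Int) ∧ p ≤ n ∧ ∀ i, i < p → pvCell board i cc = 0

theorem step_sim (n : Nat) (board : List (List Int)) (pos : List Int)
    (cols : List (List (Int × Int))) (basket : List Int) (count : Int) (m : Int)
    (hinv : pvInv n board pos cols) (hn : 0 < n) (h1 : 1 - (n:Int) ≤ m) (h2 : m ≤ (n:Int)) :
    pvInv n (pvStepA (board,pos,basket,count) m).1 (pvStepA (board,pos,basket,count) m).2.1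
          (pvStepB (cols,basket,count) m).1 ∧
    (pvStepA (board,pos,basket,count) m).2.2.1 = (pvStepB (cols,basket,count) m).2.1 ∧
    (pvStepA (board,pos,basket,count) m).2.2.2 = (pvStepB (cols,basket,count) m).2.2 := by
  obtain ⟨hbl, hpl, hcl, hsq, hcols⟩ := hinv
  have hc1 : -((n:Nat):Int) ≤ m - 1 := by omega
  have hc2 : m - 1 < ((n:Nat):Int) := by omega
  set cc := cIdx n (m-1) with hccdef
  have hcc : cc < n := cIdx_lt hc1 hc2
  obtain ⟨hcolseq, p, hposp, hpn, hzero⟩ := hcols cc hcc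
  -- cell translation
  have hcell : ∀ i : Nat, i < board.length → pvCellA board (i:Int) (m-1) = pvCell board i cc := by
    intro i hi
    unfold pvCellA pvCell
    rw [PySem.List.pyGetD_natCast]
    have hrow : (board.getD i []).length = n := by
      apply hsq
      rw [List.getD_eq_getElem board [] hi]
      exact List.getElem_mem hi
    rw [pyGetD_norm _ _ _ (by rw [hrow]; exact hc1) (by rw [hrow]; exact_mod_cast hc2), hrow]
  -- A's scan start
  have hstart : PySem.List.pyGetD pos (m-1) 0 = (p:Int) := by
    rw [pyGetD_norm _ _ _ (by rw [hpl]; exact hc1) (by rw [hpl]; exact_mod_cast hc2), hpl, hposp]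
  -- B's column lookup
  have hcolget : PySem.List.pyGetD cols (m-1) [] = pvColFrom board cc 0 := by
    rw [pyGetD_norm _ _ _ (by rw [hcl]; exact hc1) (by rw [hcl]; exact_mod_cast hc2), hcl, hcolseq]
  rcases scan_spec board (m-1) cc hcell board.length p (by omega) with
    ⟨hs, hall⟩ | ⟨j, hs, hpj, hjn, hnz, hmid⟩
  · -- column exhausted: both sides are no-ops
    have hempty : pvColFrom board cc 0 = [] := by
      rw [colFrom_eq_of_zero board cc n 0 board.length (by omega) (by omega) le_rfl
        (fun i _ hi2 => by
          by_cases hip : i < p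
          · exact hzero i hip
          · exact hall i (by omega) hi2)]
      exact colFrom_of_le board cc board.length le_rfl
    have hA : pvStepA (board,pos,basket,count) m = (board,pos,basket,count) := by
      unfold pvStepA
      simp only [hstart, hs]
    have hB : pvStepB (cols,basket,count) m = (cols,basket,count) := by
      unfold pvStepB
      simp only [hcolget, hempty]
    rw [hA, hB]
    exact ⟨⟨hbl, hpl, hcl, hsq, hcols⟩, rfl, rfl⟩
  · -- a doll is grabbed at row j
    set row := board.getD j [] with hrowdef
    have hrowmem : row ∈ board := by
      rw [hrowdef, List.getD_eq_getElem board [] hjn]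
      exact List.getElem_mem hjn
    have hrowlen : row.length = n := hsq row hrowmem
    set v := pvCell board j cc with hvdef
    set board' := board.set j (row.set cc 0) with hb'def
    -- decompose the column list
    have hcol : pvColFrom board cc 0 = ((j:Int), v) :: pvColFrom board cc (j+1) := by
      rw [colFrom_eq_of_zero board cc n 0 j (by omega) (by omega) (by omega)
        (fun i _ hi2 => by
          by_cases hip : i < p
          · exact hzero i hip
          · exact hmid i (by omega) hi2),
        colFrom_succ board cc j hjn, if_pos hnz]
      rfl
    -- reduce port A's step
    have hAboard : PySem.List.pySetD board (j:Int)
        (PySem.List.pySetD (PySem.List.pyGetD board (j:Int) []) (m-1) 0) = board' := by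
      rw [PySem.List.pyGetD_natCast, ← hrowdef,
        pySetD_norm row (m-1) 0 (by rw [hrowlen]; exact hc1) (by rw [hrowlen]; exact_mod_cast hc2),
        hrowlen, ← hccdef, PySem.List.pySetD_natCast, hb'def]
    have hApos : PySem.List.pySetD pos (m-1) (j:Int) = pos.set cc (j:Int) := by
      rw [pySetD_norm pos (m-1) _ (by rw [hpl]; exact hc1) (by rw [hpl]; exact_mod_cast hc2), hpl]
    have hAv : pvCellA board (j:Int) (m-1) = v := hcell j hjn
    have hA : pvStepA (board,pos,basket,count) m =
        (board', pos.set cc (j:Int),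
         if basket = [] ∨ basket.headD 0 ≠ v then v :: basket else basket.tail,
         if basket = [] ∨ basket.headD 0 ≠ v then count else count + 1) := by
      unfold pvStepA
      simp only [hstart, hs, hAv, hAboard, hApos]
      split <;> rfl
    have hB : pvStepB (cols,basket,count) m =
        (cols.set cc (pvColFrom board cc (j+1)),
         if basket ≠ [] ∧ basket.headD 0 = v then basket.tail else v :: basket,
         if basket ≠ [] ∧ basket.headD 0 = v then count + 1 else count) := by
      unfold pvStepB
      rw [hcolget, hcol]
      simp only
      rw [pySetD_norm cols (m-1) _ (by rw [hcl]; exact hc1) (by rw [hcl]; exact_mod_cast hc2), hcl]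
      split <;> rfl
    rw [hA, hB]
    have hlen' : board'.length = board.length := by rw [hb'def, List.length_set]
    -- cells of board'
    have hcell' : ∀ i c', i ≠ j ∨ c' ≠ cc → pvCell board' i c' = pvCell board i c' := by
      intro i c' h
      rw [hb'def, hrowdef]
      exact cell_update_ne board j cc i c' h
    have hcellj : pvCell board' j cc = 0 := by
      rw [hb'def, hrowdef]
      exact cell_update_self board j cc
    have hzero' : ∀ i, i < j + 1 → pvCell board' i cc = 0 := by
      intro i hi
      by_cases hij : i = j
      · rw [hij]; exact hcellj
      · rw [hcell' i cc (Or.inl hij)]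
        by_cases hip : i < p
        · exact hzero i hip
        · exact hmid i (by omega) (by omega)
    refine ⟨⟨by rw [hlen', hbl], by rw [List.length_set, hpl], by rw [List.length_set, hcl],
      ?_, ?_⟩, ?_, ?_⟩
    · intro r hr
      rcases List.mem_or_eq_of_mem_set hr with hmem | heq
      · exact hsq r hmem
      · rw [heq, List.length_set]
        exact hrowlen
    · intro cc' hcc'
      by_cases hee : cc' = cc
      · subst hee
        constructor
        · rw [getD_set_self cols cc _ [] (by omega),
            colFrom_eq_of_zero board' cc (j+1) 0 (j+1) (by omega) (by omega)
              (by rw [hlen']; omega) (fun i _ hi2 => hzero' i hi2)]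
          exact (colFrom_congr board' board cc (j+1) (by rw [hlen'])
            (fun i hi _ => hcell' i cc (Or.inl (by omega)))).symm
        · exact ⟨j, getD_set_self pos cc _ 0 (by omega), by omega,
            fun i hi => hzero' i (by omega)⟩
      · constructor
        · rw [getD_set_ne cols cc _ cc' [] (fun he => hee he.symm),
            (hcols cc' hcc').1]
          exact colFrom_congr board board' cc' 0 hlen'.symm
            (fun i _ _ => (hcell' i cc' (Or.inr hee)).symm)
        · obtain ⟨_, q, hq1, hq2, hq3⟩ := hcols cc' hcc'
          exact ⟨q, by rw [getD_set_ne pos cc _ cc' 0 (fun he => hee he.symm)]; exact hq1, hq2,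
            fun i hi => by rw [hcell' i cc' (Or.inr hee)]; exact hq3 i hi⟩
    · by_cases hcond : basket ≠ [] ∧ basket.headD 0 = v
      · rw [if_neg (show ¬(basket = [] ∨ basket.headD 0 ≠ v) by tauto), if_pos hcond]
      · rw [if_pos (show basket = [] ∨ basket.headD 0 ≠ v by tauto), if_neg hcond]
    · by_cases hcond : basket ≠ [] ∧ basket.headD 0 = v
      · rw [show (if basket = [] ∨ basket.headD 0 ≠ v then count else count + 1) = count + 1
              from if_neg (by tauto), if_pos hcond, if_pos hcond]
      · rw [show (if basket = [] ∨ basket.headD 0 ≠ v then count else count + 1) = count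
              from if_pos (by tauto), if_neg hcond, if_neg hcond]

theorem loop_sim (n : Nat) : ∀ (moves : List Int) (board : List (List Int)) (pos : List Int)
    (cols : List (List (Int × Int))) (basket : List Int) (count : Int),
    pvInv n board pos cols →
    (∀ m ∈ moves, 0 < n ∧ 1 - (n:Int) ≤ m ∧ m ≤ (n:Int)) →
    (moves.foldl pvStepA (board,pos,basket,count)).2.2.2 =
      (moves.foldl pvStepB (cols,basket,count)).2.2 := by
  intro moves
  induction moves with
  | nil => intro _ _ _ _ _ _ _; rfl
  | cons m ms ih =>
    intro board pos cols basket count hinv hmv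
    obtain ⟨hn, h1, h2⟩ := hmv m List.mem_cons_self
    obtain ⟨hinv', hbeq, hceq⟩ := step_sim n board pos cols basket count m hinv hn h1 h2
    rw [List.foldl_cons, List.foldl_cons]
    have hrw : pvStepB (cols,basket,count) m
        = ((pvStepB (cols,basket,count) m).1, (pvStepA (board,pos,basket,count) m).2.2.1,
           (pvStepA (board,pos,basket,count) m).2.2.2) := by
      rw [hbeq, hceq]
    rw [hrw]
    exact ih (pvStepA (board,pos,basket,count) m).1 (pvStepA (board,pos,basket,count) m).2.1
      (pvStepB (cols,basket,count) m).1 (pvStepA (board,pos,basket,count) m).2.2.1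
      (pvStepA (board,pos,basket,count) m).2.2.2 hinv'
      (fun m' hm' => hmv m' (List.mem_cons_of_mem m hm'))

theorem inv_init (board : List (List Int)) (hsq : ∀ row ∈ board, row.length = board.length) :
    pvInv board.length board (List.replicate board.length 0) (pvColsB board) := by
  refine ⟨rfl, List.length_replicate, by simp [pvColsB], hsq, fun cc hcc => ?_⟩
  refine ⟨colsB_getD board cc hcc, 0, ?_, by omega, fun i hi => absurd hi (by omega)⟩
  rw [List.getD_eq_getElem _ 0 (by simp [hcc]), List.getElem_replicate]
  rfl

theorem solution_spec' : ∀ (board : List (List Int)) (moves : List Int),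
    (∀ row ∈ board, row.length = board.length) →
    (∀ m ∈ moves, 0 < board.length ∧ 1 - (board.length:Int) ≤ m ∧ m ≤ (board.length:Int)) →
    solution board moves = solution_alt board moves := by
  intro board moves hsq hmv
  unfold solution solution_alt
  rw [loop_sim board.length moves board (List.replicate board.length 0) (pvColsB board) [] 0
    (inv_init board hsq) hmv]

-- ===== VERDICT (by name: the statement is the Claim_ definition above) =====
theorem solution_spec : Claim_equal_solution := by
  intro board moves _ hpre
  unfold Spec_solution
  exact solution_spec' board moves hpre.1 hpre.2
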